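-- pv_equiv track=rewrite | github.com/KNikhil2709/MIST_Taskphase | spiral.py | fill_grid_rowwise
-- ===== SOURCE A (Python) =====
-- def fill_grid_rowwise(cipher, rows, cols):
--     grid = [['']*cols for _ in range(rows)]
--     idx = 0
--     for r in range(rows):
--         for c in range(cols):
--             if idx < len(cipher):
--                 grid[r][c] = cipher[idx]
--                 idx += 1
--     return grid
-- ===== SOURCE B (Python) =====
-- def fill_grid_rowwise(cipher, rows, cols):
--     if cols <= 0:
--         return [[] for _ in range(rows)]
--     grid = []
--     for r in range(rows):
--         chunk = cipher[r * cols:(r + 1) * cols]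
--         grid.append(list(chunk) + [''] * (cols - len(chunk)))
--     return grid
-- ===== Notes on version B (the rewrite author's own statement) =====
-- stated objective: simpler
-- what changed: Replaces the pre-allocated mutable grid with per-cell index counter and guard by building each row directly from the string slice cipher[r*cols:(r+1)*cols] plus explicit tail padding.
import Mathlib
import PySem

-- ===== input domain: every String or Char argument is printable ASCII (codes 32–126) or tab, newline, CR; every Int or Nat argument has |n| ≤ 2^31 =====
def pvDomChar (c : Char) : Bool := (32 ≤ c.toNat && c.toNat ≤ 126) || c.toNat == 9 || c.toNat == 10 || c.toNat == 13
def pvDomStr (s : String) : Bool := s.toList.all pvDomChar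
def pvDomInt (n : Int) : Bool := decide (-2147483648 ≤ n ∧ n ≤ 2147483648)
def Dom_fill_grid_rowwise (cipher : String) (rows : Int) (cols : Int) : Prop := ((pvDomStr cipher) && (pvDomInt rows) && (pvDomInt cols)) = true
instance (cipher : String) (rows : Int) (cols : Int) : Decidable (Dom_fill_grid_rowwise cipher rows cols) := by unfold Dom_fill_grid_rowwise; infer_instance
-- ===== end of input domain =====

-- B builds each row directly from the slice cipher[r*cols:(r+1)*cols] plus explicit tail padding,
-- instead of A's pre-allocated grid mutated cell by cell under an idx counter (objective: simpler).

-- ===== PORT A =====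
-- cipher[idx] as a one-character string; A's guard idx < len(cipher) always keeps idx in range
def pvCell (cipher : String) (idx : Int) : String :=
  ((PySem.Str.pyGet? cipher idx).map (fun ch => String.ofList [ch])).getD ""

-- the body of A's inner loop: state (grid, idx), 'if idx < len(cipher): grid[r][c] = cipher[idx]; idx += 1'
def pvInnerA (cipher : String) (r : Int) (st : List (List String) × Int) (c : Int) :
    List (List String) × Int :=
  if st.2 < PySem.Str.len cipher then
    (st.1.set r.toNat ((st.1.getD r.toNat []).set c.toNat (pvCell cipher st.2)), st.2 + 1)
  else st

def fill_grid_rowwise (cipher : String) (rows : Int) (cols : Int) : List (List String) :=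
  let grid := (PySem.List.pyRange 0 rows).map (fun _ => List.replicate cols.toNat "")
  ((PySem.List.pyRange 0 rows).foldl
    (fun st r => (PySem.List.pyRange 0 cols).foldl (pvInnerA cipher r) st) (grid, 0)).1

-- ===== PORT B =====
def fill_grid_rowwise_alt (cipher : String) (rows : Int) (cols : Int) : List (List String) :=
  if cols ≤ 0 then
    (PySem.List.pyRange 0 rows).map (fun _ => ([] : List String))
  else
    (PySem.List.pyRange 0 rows).foldl (fun grid r =>
      let chunk := PySem.Str.slice cipher (some (r * cols)) (some ((r + 1) * cols))
      grid ++ [chunk.toList.map (fun ch => String.ofList [ch]) ++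
               List.replicate (cols - PySem.Str.len chunk).toNat ""]) []

-- ===== PRECONDITION & SPEC =====
def Spec_fill_grid_rowwise (cipher : String) (rows : Int) (cols : Int) (out : List (List String)) : Prop := out = fill_grid_rowwise_alt cipher rows cols
instance (cipher : String) (rows : Int) (cols : Int) (out : List (List String)) : Decidable (Spec_fill_grid_rowwise cipher rows cols out) := by unfold Spec_fill_grid_rowwise; infer_instance

-- ===== CLAIM (what is proved, stated in full; the proofs are below) =====
def Claim_equal_fill_grid_rowwise : Prop := ∀ (cipher : String) (rows : Int) (cols : Int), Dom_fill_grid_rowwise cipher rows cols → Spec_fill_grid_rowwise cipher rows cols (fill_grid_rowwise cipher rows cols)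

-- ===== LEMMAS AND PROOFS =====

-- A's inner loop acting on the single row r only (Int column index, as in the port)
def pvRowA (cipher : String) (st : List String × Int) (c : Int) : List String × Int :=
  if st.2 < PySem.Str.len cipher then
    (st.1.set c.toNat (pvCell cipher st.2), st.2 + 1)
  else st

-- the same with a Nat column index
def pvRowN (cipher : String) (st : List String × Int) (c : Nat) : List String × Int :=
  if st.2 < PySem.Str.len cipher then
    (st.1.set c (pvCell cipher st.2), st.2 + 1)
  else st

-- the row B builds for row index r (written with i = min (r*C) n, the value of A's idx counter there)
def pvRow (cipher : String) (C r : Nat) : List String :=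
  ((cipher.toList.map (fun ch => String.ofList [ch])).drop (min (r * C) cipher.toList.length)).take C
    ++ List.replicate (C - (cipher.toList.length - min (r * C) cipher.toList.length)) ""

theorem pv_set_getElem? {α : Type} (g : List α) (r : Nat) (x : α)
    (h : g[r]? = some x) : g.set r x = g := by
  induction g generalizing r with
  | nil => simp at h
  | cons a l ih =>
    cases r with
    | zero => simp_all
    | succ r => simp_all

theorem pv_inner_factor (cipher : String) (l : List Int) :
    ∀ (g : List (List String)) (r : Nat) (row : List String) (i : Int),
    g[r]? = some row →
    l.foldl (pvInnerA cipher (r : Int)) (g, i)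
      = (g.set r (l.foldl (pvRowA cipher) (row, i)).1,
         (l.foldl (pvRowA cipher) (row, i)).2) := by
  induction l with
  | nil =>
    intro g r row i h
    simp [pv_set_getElem? g r row h]
  | cons c l ih =>
    intro g r row i h
    have hr : r < g.length := (List.getElem?_eq_some_iff.mp h).1
    have hget : g.getD r [] = row := by
      rw [List.getD_eq_getElem?_getD, h]; rfl
    by_cases hi : i < PySem.Str.len cipher
    · simp only [List.foldl_cons, pvInnerA, pvRowA, hi, if_pos, Int.toNat_natCast, hget]
      rw [ih (g.set r (row.set c.toNat (pvCell cipher i))) r (row.set c.toNat (pvCell cipher i))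
            (i + 1) (List.getElem?_set_self (by simpa using hr))]
      simp [List.set_set]
    · simp only [List.foldl_cons, pvInnerA, pvRowA, hi, if_neg, not_false_iff]
      exact ih g r row i h

theorem pv_row_fill (cipher : String) :
    ∀ (C a : Nat) (pre : List String) (i : Nat),
    pre.length = a → i ≤ cipher.toList.length →
    (List.range' a C).foldl (pvRowN cipher) (pre ++ List.replicate C "", (i : Int))
      = (pre ++ ((cipher.toList.map (fun ch => String.ofList [ch])).drop i).take C
            ++ List.replicate (C - (cipher.toList.length - i)) "",
         ((min (i + C) cipher.toList.length : Nat) : Int)) := by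
  intro C
  induction C with
  | zero =>
    intro a pre i hpre hi
    have hlen' : cipher.toList.length = cipher.length := by simp
    simp
    omega
  | succ C ih =>
    intro a pre i hpre hi
    have hlen' : cipher.toList.length = cipher.length := by simp
    have hguard : ((i : Int) < PySem.Str.len cipher) ↔ i < cipher.toList.length := by
      simp [PySem.Str.len_eq]
    rw [List.range'_succ, List.foldl_cons]
    by_cases h : i < cipher.toList.length
    · have hcell : pvCell cipher (i : Int) = String.ofList [cipher.toList[i]] := by
        simp [pvCell, List.getElem?_eq_getElem h]
      have hstep : pvRowN cipher (pre ++ List.replicate (C + 1) "", (i : Int)) a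
          = ((pre ++ [String.ofList [cipher.toList[i]]]) ++ List.replicate C "", ((i + 1 : Nat) : Int)) := by
        simp only [pvRowN, if_pos (hguard.mpr h), hcell]
        rw [List.replicate_succ, List.set_append]
        simp [hpre]
      rw [hstep, ih (a + 1) (pre ++ [String.ofList [cipher.toList[i]]]) (i + 1) (by simp [hpre]) h]
      have hml : i < (cipher.toList.map (fun ch => String.ofList [ch])).length := by simpa using h
      have hdrop : (cipher.toList.map (fun ch => String.ofList [ch])).drop i
          = String.ofList [cipher.toList[i]] :: (cipher.toList.map (fun ch => String.ofList [ch])).drop (i + 1) := by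
        rw [List.drop_eq_getElem_cons hml]; simp
      simp [hdrop, List.take_succ_cons]
      omega
    · have hstep : pvRowN cipher (pre ++ List.replicate (C + 1) "", (i : Int)) a
          = ((pre ++ [""]) ++ List.replicate C "", (i : Int)) := by
        simp only [pvRowN, if_neg (hguard.not.mpr h)]
        rw [List.replicate_succ]
        simp
      rw [hstep, ih (a + 1) (pre ++ [""]) i (by simp [hpre]) hi]
      have hdrop : (cipher.toList.map (fun ch => String.ofList [ch])).drop i = [] := by
        apply List.drop_eq_nil_of_le; simp; omega
      have hlen2 : PySem.Str.len cipher = (cipher.toList.length : Int) := PySem.Str.len_eq cipher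
      simp [hdrop]
      have hi0 : cipher.length - i = 0 := by omega
      refine ⟨?_, by omega⟩
      rw [hi0]
      simp [List.replicate_succ]

theorem pv_rowA_natCast (cipher : String) (st : List String × Int) (c : Nat) :
    pvRowA cipher st (c : Int) = pvRowN cipher st c := by
  simp [pvRowA, pvRowN]

theorem pv_outer_fill (cipher : String) (C : Nat) :
    ∀ (R a : Nat) (preG : List (List String)), preG.length = a →
    (List.range' a R).foldl
        (fun st (r : Nat) => (PySem.List.pyRange 0 (C : Int)).foldl (pvInnerA cipher (r : Int)) st)
        (preG ++ List.replicate R (List.replicate C ""), ((min (a * C) cipher.toList.length : Nat) : Int))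
      = (preG ++ (List.range' a R).map (pvRow cipher C),
         ((min ((a + R) * C) cipher.toList.length : Nat) : Int)) := by
  intro R
  induction R with
  | zero => intro a preG hpre; simp
  | succ R ih =>
    intro a preG hpre
    rw [List.range'_succ, List.foldl_cons]
    have hget : (preG ++ List.replicate (R + 1) (List.replicate C ""))[a]? = some (List.replicate C "") := by
      rw [List.getElem?_append_right (by omega)]
      simp [hpre]
    rw [pv_inner_factor cipher _ _ a (List.replicate C "") _ hget]
    have hinner : (PySem.List.pyRange 0 (C : Int)).foldl (pvRowA cipher)
        (List.replicate C "", ((min (a * C) cipher.toList.length : Nat) : Int))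
        = (pvRow cipher C a, ((min (min (a * C) cipher.toList.length + C) cipher.toList.length : Nat) : Int)) := by
      rw [PySem.List.pyRange_zero_natCast, List.foldl_map]
      have hfun : (fun (st : List String × Int) (k : Nat) => pvRowA cipher st (k : Int)) = pvRowN cipher := by
        funext st k
        exact pv_rowA_natCast cipher st k
      rw [hfun, List.range_eq_range',
        show (List.replicate C "" : List String) = [] ++ List.replicate C "" from rfl,
        pv_row_fill cipher C 0 [] (min (a * C) cipher.toList.length) rfl (by omega)]
      simp [pvRow]
    rw [hinner]
    have hset : (preG ++ List.replicate (R + 1) (List.replicate C "")).set a (pvRow cipher C a)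
        = (preG ++ [pvRow cipher C a]) ++ List.replicate R (List.replicate C "") := by
      rw [List.replicate_succ, List.set_append]
      simp [hpre]
    rw [hset]
    have hmin : min (min (a * C) cipher.toList.length + C) cipher.toList.length
        = min ((a + 1) * C) cipher.toList.length := by
      have hx : (a + 1) * C = a * C + C := by ring
      omega
    rw [hmin, ih (a + 1) (preG ++ [pvRow cipher C a]) (by simp [hpre])]
    have : a + 1 + R = a + (R + 1) := by omega
    simp [this]

theorem pv_foldl_const {α β : Type} (l : List β) (init : α) :
    l.foldl (fun s _ => s) init = init := by
  induction l generalizing init with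
  | nil => rfl
  | cons b l ih => simpa using ih init

theorem pv_foldl_append_map {α β : Type} (l : List α) (f : α → List β) :
    ∀ (acc : List (List β)), l.foldl (fun g r => g ++ [f r]) acc = acc ++ l.map f := by
  induction l with
  | nil => intro acc; simp
  | cons a l ih => intro acc; simp [ih]

-- B's row for column count C > 0 at row index k equals pvRow
theorem pv_rowB_eq (cipher : String) (C k : Nat) :
    (PySem.Str.slice cipher (some ((k : Int) * (C : Int))) (some (((k : Int) + 1) * (C : Int)))).toList.map
        (fun ch => String.ofList [ch])
      ++ List.replicate (((C : Int) - PySem.Str.len (PySem.Str.slice cipher (some ((k : Int) * (C : Int))) (some (((k : Int) + 1) * (C : Int))))).toNat) ""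
    = pvRow cipher C k := by
  have hb : ((k : Int) + 1) * (C : Int) = ((k * C : Nat) : Int) + ((C : Nat) : Int) := by push_cast; ring
  have ha : (k : Int) * (C : Int) = ((k * C : Nat) : Int) := by push_cast; ring
  rw [ha, hb]
  have hsl : (PySem.Str.slice cipher (some ((k * C : Nat) : Int)) (some (((k * C : Nat) : Int) + ((C : Nat) : Int)))).toList
      = (cipher.toList.drop (k * C)).take C := by
    rw [PySem.Str.toList_slice, PySem.Chars.slice_eq_listSlice]
    exact PySem.List.slice_natCast_add cipher.toList (k * C) C
  rw [PySem.Str.len_eq, hsl]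
  have hlen : ((cipher.toList.drop (k * C)).take C).length = min C (cipher.toList.length - k * C) := by
    simp
  have hpadi : (((C : Nat) : Int) - (((cipher.toList.drop (k * C)).take C).length : Int)).toNat
      = C - (cipher.toList.length - min (k * C) cipher.toList.length) := by
    rw [hlen]; omega
  rw [hpadi]
  have hdrop : (cipher.toList.map (fun ch => String.ofList [ch])).drop (min (k * C) cipher.toList.length)
      = (cipher.toList.map (fun ch => String.ofList [ch])).drop (k * C) := by
    rcases Nat.le_total (k * C) cipher.toList.length with h | h
    · rw [Nat.min_eq_left h]
    · rw [Nat.min_eq_right h]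
      rw [List.drop_eq_nil_of_le (by simpa using h), List.drop_eq_nil_of_le (by simpa using h)]
  unfold pvRow
  rw [hdrop, List.map_take, List.map_drop]

-- ===== VERDICT (by name: the statement is the Claim_ definition above) =====
theorem fill_grid_rowwise_spec : Claim_equal_fill_grid_rowwise := by
  intro cipher rows cols _dom
  unfold Spec_fill_grid_rowwise fill_grid_rowwise fill_grid_rowwise_alt
  by_cases hc : cols ≤ 0
  · rw [if_pos hc, PySem.List.pyRange_one_eq_nil hc]
    simp only [List.foldl_nil]
    rw [pv_foldl_const]
    have : cols.toNat = 0 := by omega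
    simp [this]
  · rw [if_neg hc]
    push_neg at hc
    obtain ⟨C, hC⟩ : ∃ C : Nat, cols = (C : Int) := ⟨cols.toNat, (Int.toNat_of_nonneg hc.le).symm⟩
    subst hC
    rw [PySem.List.pyRange_one 0 rows]
    simp only [Int.sub_zero, zero_add, List.foldl_map, List.map_map]
    have hgrid : (List.range rows.toNat).map ((fun _ => List.replicate (C : Int).toNat "") ∘ (fun k : Nat => (k : Int)))
        = List.replicate rows.toNat (List.replicate C "") := by
      simp [Function.comp_def, List.map_const']
    rw [hgrid]
    have H := pv_outer_fill cipher C rows.toNat 0 [] rfl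
    simp only [Nat.zero_mul, Nat.zero_min, Nat.cast_zero, List.nil_append, Nat.zero_add] at H
    rw [List.range_eq_range', H]
    rw [pv_foldl_append_map]
    simp only [List.nil_append]
    apply List.map_congr_left
    intro k _
    exact (pv_rowB_eq cipher C k).symm
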